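-- pv_equiv track=rewrite | github.com/bojan-karlas/string-common-intervals | didier.py | compute_rank_intervals
-- ===== SOURCE A (Python) =====
-- def compute_rank_intervals(string, ranks):
--   # Output is a hash table
--   # with {key = position; value = (left_bound, right_bound)}.
--   rankint = {};
--
--   # Stack contains tuples: (rank, position, left_bound)
--   # Init stack with string edge placeholder of infinite rank.
--   stack = [(float('inf'), -1, -1)]
--
--   for i in range(len(string)):
--     c = string[i]
--
--     # Pop from the stack all the positions of rank smaller than the current one.
--     while stack[-1][0] < ranks[c]:
--       rankint[stack[-1][1]] = (stack[-1][2], i)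
--       stack.pop()
--
--     # Push the current position to the stack.
--     if stack[-1][0] == ranks[c]:
--       stack.append((ranks[c], i, stack[-1][2]))
--     else:
--       stack.append((ranks[c], i, stack[-1][1] + 1))
--
--   # Flush the stack.
--   while len(stack) > 1:
--     rankint[stack[-1][1]] = (stack[-1][2], len(string))
--     stack.pop()
--
--   return rankint
-- ===== SOURCE B (Python) =====
-- def compute_rank_intervals(string, ranks):
--     n = len(string)
--     rank = [ranks[string[i]] for i in range(n)]
--
--     def nearest_above(j, strict):
--         # Nearest position to the left of j whose rank exceeds rank[j]
--         # (or at least equals it, when strict is False); -1 if there is none.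
--         k = j - 1
--         while k >= 0 and (rank[k] <= rank[j] if strict else rank[k] < rank[j]):
--             k -= 1
--         return k
--
--     higher = [nearest_above(j, True) for j in range(n)]
--     peer = [nearest_above(j, False) for j in range(n)]
--
--     intervals = {}
--     for i in range(n):
--         # Positions whose interval is closed by i: follow the peer links
--         # leftward from i - 1 while the rank stays below rank[i].
--         j = i - 1
--         while j >= 0 and rank[j] < rank[i]:
--             intervals[j] = (higher[j] + 1, i)
--             j = peer[j]
--     # The end of the string closes every interval still open.
--     j = n - 1
--     while j >= 0:
--         intervals[j] = (higher[j] + 1, n)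
--         j = peer[j]
--     return intervals
-- ===== Notes on version B (the rewrite author's own statement) =====
-- stated objective: alternative
-- what changed: Replaces A's single-pass monotonic stack with precomputed nearest-above arrays (per-position leftward scans for the nearest strictly-greater and greater-or-equal rank) and emits each interval when its closing position is reached by jumping along the greater-or-equal peer links; no stack is maintained. Pre_ excludes only inputs where A raises KeyError (a character missing from ranks).
import Mathlib
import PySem

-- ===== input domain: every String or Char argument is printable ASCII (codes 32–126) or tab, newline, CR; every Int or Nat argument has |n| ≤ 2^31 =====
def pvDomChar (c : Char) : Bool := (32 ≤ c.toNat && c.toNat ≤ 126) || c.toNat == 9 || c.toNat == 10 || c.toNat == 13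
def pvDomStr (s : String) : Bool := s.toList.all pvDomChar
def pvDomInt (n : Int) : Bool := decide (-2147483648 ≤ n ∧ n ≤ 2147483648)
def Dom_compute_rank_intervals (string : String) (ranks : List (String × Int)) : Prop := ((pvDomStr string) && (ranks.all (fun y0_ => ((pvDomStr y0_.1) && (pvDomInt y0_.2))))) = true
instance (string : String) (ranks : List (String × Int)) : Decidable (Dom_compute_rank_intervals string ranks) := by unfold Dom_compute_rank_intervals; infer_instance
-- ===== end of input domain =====

-- B replaces A's single-pass monotonic stack by precomputed nearest-above scans plus
-- peer-link chain emission (alternative algorithm, same return value).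

-- rank lookup ranks[c] (first match); the `.getD 0` arm is unreachable under
-- Pre_compute_rank_intervals (Python raises KeyError exactly where get? = none)
def pvRankGet (ranks : List (String × Int)) (c : Char) : Option Int :=
  PySem.Dict.get? (PySem.Dict.mk ranks) (String.ofList [c])

-- ===== PORT A =====
-- stack entry (rank, position, left_bound); rank `none` models float('inf'):
-- it compares greater than (and unequal to) every int rank, exactly as inf does.
-- 'while stack[-1][0] < ranks[c]: rankint[…] = …; stack.pop()' (top = list head);
-- popped keys are fresh, so each dict write appends one item.
def pvPopA (rc i : Int) : List (Option Int × Int × Int) → List (Int × Int × Int) × List (Option Int × Int × Int)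
  | [] => ([], [])     -- unreachable: the sentinel is never popped
  | (rk, pos, lb) :: rest =>
    if (match rk with | some v => decide (v < rc) | none => false) then
      let (e, s) := pvPopA rc i rest
      ((pos, lb, i) :: e, s)
    else ([], (rk, pos, lb) :: rest)

-- one iteration of 'for i in range(len(string))': pop, then push
def pvStepA (rc i : Int) (st : List (Int × Int × Int) × List (Option Int × Int × Int)) :
    List (Int × Int × Int) × List (Option Int × Int × Int) :=
  let (e, s) := pvPopA rc i st.2
  match s with
  | [] => (st.1 ++ e, [(some rc, i, 0)])    -- unreachable: the sentinel is never popped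
  | (rk, pos, lb) :: _ =>
    if (match rk with | some v => v == rc | none => false) then
      (st.1 ++ e, (some rc, i, lb) :: s)
    else
      (st.1 ++ e, (some rc, i, pos + 1) :: s)

def pvLoopA (ranks : List (String × Int)) : List Char → Int →
    List (Int × Int × Int) × List (Option Int × Int × Int) →
    List (Int × Int × Int) × List (Option Int × Int × Int)
  | [], _, st => st
  | c :: cs, i, st => pvLoopA ranks cs (i + 1) (pvStepA ((pvRankGet ranks c).getD 0) i st)

-- 'while len(stack) > 1: rankint[…] = …; stack.pop()'
def pvFlushA (n : Int) : List (Option Int × Int × Int) → List (Int × Int × Int)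
  | [] => []
  | [_] => []
  | (_, pos, lb) :: rest => (pos, lb, n) :: pvFlushA n rest

def compute_rank_intervals (string : String) (ranks : List (String × Int)) : List (Int × Int × Int) :=
  let cs := string.toList
  let st := pvLoopA ranks cs 0 ([], [(none, -1, -1)])
  st.1 ++ pvFlushA (cs.length : Int) st.2

-- ===== PORT B =====
-- 'k = j - 1; while k >= 0 and (rank[k] <= rank[j] if strict else rank[k] < rank[j]):
--  k -= 1; return k'  (arg = j)
def pvNearest (rk : List Int) (rj : Int) (strict : Bool) : Nat → Int
  | 0 => -1
  | k + 1 =>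
    if (if strict then rk.getD k 0 ≤ rj else rk.getD k 0 < rj) then pvNearest rk rj strict k
    else (k : Int)

-- 'j = i - 1; while j >= 0 and rank[j] < rank[i]: intervals[j] = (higher[j] + 1, i); j = peer[j]'
-- keys j are fresh, so each dict write appends one item; fuel bounds the walk (never
-- exhausted: peer links strictly decrease, see the proofs below)
def pvClose (rk hi pe : List Int) (ri i : Int) : Int → Nat → List (Int × Int × Int)
  | _, 0 => []
  | j, fuel + 1 =>
    if 0 ≤ j ∧ rk.getD j.toNat 0 < ri then
      ((j, hi.getD j.toNat 0 + 1, i)) :: pvClose rk hi pe ri i (pe.getD j.toNat 0) fuel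
    else []

-- 'j = n - 1; while j >= 0: intervals[j] = (higher[j] + 1, n); j = peer[j]'
def pvSettle (hi pe : List Int) (nI : Int) : Int → Nat → List (Int × Int × Int)
  | _, 0 => []
  | j, fuel + 1 =>
    if 0 ≤ j then
      ((j, hi.getD j.toNat 0 + 1, nI)) :: pvSettle hi pe nI (pe.getD j.toNat 0) fuel
    else []

def compute_rank_intervals_alt (string : String) (ranks : List (String × Int)) : List (Int × Int × Int) :=
  let cs := string.toList
  let n := cs.length
  let rk := cs.map (fun c => (pvRankGet ranks c).getD 0)
  let hi := (List.range n).map (fun j => pvNearest rk (rk.getD j 0) true j)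
  let pe := (List.range n).map (fun j => pvNearest rk (rk.getD j 0) false j)
  let main := (List.range n).foldl
    (fun acc i => acc ++ pvClose rk hi pe (rk.getD i 0) (i : Int) ((i : Int) - 1) n) []
  main ++ pvSettle hi pe (n : Int) ((n : Int) - 1) n

-- ===== PRECONDITION & SPEC =====
-- Pre_ excludes exactly the inputs where Python A raises KeyError: some character
-- of the string is not a key of ranks.
def Pre_compute_rank_intervals (string : String) (ranks : List (String × Int)) : Prop :=
  (string.toList.all (fun c => (PySem.Dict.get? (PySem.Dict.mk ranks) (String.ofList [c])).isSome)) = true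

instance (string : String) (ranks : List (String × Int)) : Decidable (Pre_compute_rank_intervals string ranks) := by
  unfold Pre_compute_rank_intervals; infer_instance

def pvWitness_compute_rank_intervals : String × (List (String × Int)) := ("abacbc", [("a", 1), ("b", 2), ("c", 2)])

def Spec_compute_rank_intervals (string : String) (ranks : List (String × Int)) (out : List (Int × Int × Int)) : Prop := out = compute_rank_intervals_alt string ranks
instance (string : String) (ranks : List (String × Int)) (out : List (Int × Int × Int)) : Decidable (Spec_compute_rank_intervals string ranks out) := by unfold Spec_compute_rank_intervals; infer_instance

-- ===== CLAIM (what is proved, stated in full; the proofs are below) =====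
def Claim_equal_compute_rank_intervals : Prop := ∀ (string : String) (ranks : List (String × Int)), Dom_compute_rank_intervals string ranks → Pre_compute_rank_intervals string ranks → Spec_compute_rank_intervals string ranks (compute_rank_intervals string ranks)

-- ===== LEMMAS AND PROOFS =====

-- ---- generic helpers ----

-- greatest witness below a bound
theorem pvGreatest (P : Nat → Prop) : ∀ (b m : Nat), m < b → P m →
    ∃ m', m ≤ m' ∧ m' < b ∧ P m' ∧ ∀ k, m' < k → k < b → ¬ P k := by
  intro b
  induction b with
  | zero => intro m hm; omega
  | succ b ih =>
    intro m hm hP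
    by_cases hb : P b
    · exact ⟨b, by omega, by omega, hb, fun k h1 h2 => absurd h1 (by omega)⟩
    · have hm' : m < b := by
        rcases Nat.lt_succ_iff_lt_or_eq.mp hm with h | h
        · exact h
        · exact absurd (h ▸ hP) hb
      obtain ⟨m', h1, h2, h3, h4⟩ := ih m hm' hP
      refine ⟨m', h1, by omega, h3, fun k hk1 hk2 => ?_⟩
      rcases Nat.lt_succ_iff_lt_or_eq.mp hk2 with h | h
      · exact h4 k hk1 h
      · exact h ▸ hb

-- if the p-elements of l form a downward-closed prefix, takeWhile/dropWhile are filters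
theorem pvTakeDrop {α : Type} (p : α → Bool) : ∀ (l : List α),
    l.Pairwise (fun a b => p b = true → p a = true) →
    l.takeWhile p = l.filter p ∧ l.dropWhile p = l.filter (fun x => !p x) := by
  intro l
  induction l with
  | nil => simp
  | cons a t ih =>
    intro h
    rcases List.pairwise_cons.mp h with ⟨ha, ht⟩
    rcases ih ht with ⟨h1, h2⟩
    by_cases hpa : p a = true
    · simp [hpa, h1, h2]
    · have hall : ∀ x ∈ t, p x = false := by
        intro x hx
        by_contra hc
        exact hpa (ha x hx (by simpa using hc))
      constructor
      · simp only [List.takeWhile_cons, List.filter_cons, hpa, if_false, Bool.false_eq_true]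
        exact ((List.filter_eq_nil_iff).mpr (fun x hx => by simp [hall x hx])).symm
      · simp only [List.dropWhile_cons, List.filter_cons, hpa, if_false, Bool.false_eq_true,
          Bool.not_false, if_true]
        exact congrArg (a :: ·) ((List.filter_eq_self).mpr (fun x hx => by simp [hall x hx])).symm

-- ---- characterisation of the nearest-above scans ----

-- pvScanL rk rj b = pvNearest rk rj true b + 1: the left bound of a position of rank rj
-- looked at from index b
def pvScanL (rs : List Int) (rj : Int) : Nat → Int
  | 0 => 0
  | k + 1 => if rs.getD k 0 ≤ rj then pvScanL rs rj k else ((k : Int) + 1)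

theorem pvNearest_true_succ (rs : List Int) (rj : Int) : ∀ b, pvNearest rs rj true b + 1 = pvScanL rs rj b := by
  intro b
  induction b with
  | zero => rfl
  | succ k ih =>
    by_cases h : rs.getD k 0 ≤ rj
    · rw [pvNearest, pvScanL, if_pos (by simpa using h), if_pos h]
      exact ih
    · rw [pvNearest, pvScanL, if_neg (by simpa using h), if_neg h]

def pvIsLb (rs : List Int) (rj : Int) (b : Nat) (w : Int) : Prop :=
  (w = 0 ∧ ∀ m, m < b → rs.getD m 0 ≤ rj) ∨
  (∃ m : Nat, w = (m : Int) + 1 ∧ m < b ∧ rj < rs.getD m 0 ∧ ∀ k, m < k → k < b → rs.getD k 0 ≤ rj)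

theorem pvScanL_isLb (rs : List Int) (rj : Int) : ∀ b, pvIsLb rs rj b (pvScanL rs rj b) := by
  intro b
  induction b with
  | zero => exact Or.inl ⟨rfl, by omega⟩
  | succ k ih =>
    rw [pvScanL]
    split
    · rename_i h
      rcases ih with ⟨h0, hall⟩ | ⟨m, hw, hm, hgt, hall⟩
      · refine Or.inl ⟨h0, fun m hm => ?_⟩
        rcases Nat.lt_succ_iff_lt_or_eq.mp hm with h' | h'
        · exact hall m h'
        · exact h' ▸ h
      · refine Or.inr ⟨m, hw, by omega, hgt, fun k' h1 h2 => ?_⟩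
        rcases Nat.lt_succ_iff_lt_or_eq.mp h2 with h' | h'
        · exact hall k' h1 h'
        · exact h' ▸ h
    · rename_i h
      exact Or.inr ⟨k, rfl, by omega, by omega, fun k' h1 h2 => by omega⟩

theorem pvIsLb_unique (rs : List Int) (rj : Int) (b : Nat) (w w' : Int)
    (h1 : pvIsLb rs rj b w) (h2 : pvIsLb rs rj b w') : w = w' := by
  rcases h1 with ⟨e1, a1⟩ | ⟨m, e1, hm, g1, a1⟩ <;> rcases h2 with ⟨e2, a2⟩ | ⟨m', e2, hm', g2, a2⟩
  · omega
  · exact absurd (a1 m' hm') (by omega)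
  · exact absurd (a2 m hm) (by omega)
  · rcases Nat.lt_trichotomy m m' with h | h | h
    · exact absurd (a1 m' h hm') (by omega)
    · omega
    · exact absurd (a2 m h hm) (by omega)

theorem pvScanL_eq_of_isLb (rs : List Int) (rj : Int) (b : Nat) (w : Int)
    (h : pvIsLb rs rj b w) : pvScanL rs rj b = w :=
  pvIsLb_unique rs rj b _ w (pvScanL_isLb rs rj b) h

-- the peer link: nearest position below b of rank ≥ rj
def pvIsGe (rs : List Int) (rj : Int) (b : Nat) (w : Int) : Prop :=
  (w = -1 ∧ ∀ m, m < b → rs.getD m 0 < rj) ∨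
  (∃ k : Nat, w = (k : Int) ∧ k < b ∧ rj ≤ rs.getD k 0 ∧ ∀ m, k < m → m < b → rs.getD m 0 < rj)

theorem pvNearest_isGe (rs : List Int) (rj : Int) : ∀ b, pvIsGe rs rj b (pvNearest rs rj false b) := by
  intro b
  induction b with
  | zero => exact Or.inl ⟨rfl, by omega⟩
  | succ k ih =>
    rw [pvNearest]
    simp only [if_false, Bool.false_eq_true]
    split
    · rename_i h
      rcases ih with ⟨h0, hall⟩ | ⟨m, hw, hm, hge, hall⟩
      · refine Or.inl ⟨h0, fun m hm => ?_⟩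
        rcases Nat.lt_succ_iff_lt_or_eq.mp hm with h' | h'
        · exact hall m h'
        · exact h' ▸ h
      · refine Or.inr ⟨m, hw, by omega, hge, fun k' h1 h2 => ?_⟩
        rcases Nat.lt_succ_iff_lt_or_eq.mp h2 with h' | h'
        · exact hall k' h1 h'
        · exact h' ▸ h
    · rename_i h
      exact Or.inr ⟨k, rfl, by omega, by omega, fun k' h1 h2 => by omega⟩

theorem pvNearest_false_lt (rs : List Int) (rj : Int) (b : Nat) :
    -1 ≤ pvNearest rs rj false b ∧ pvNearest rs rj false b < (b : Int) := by
  rcases pvNearest_isGe rs rj b with ⟨h0, -⟩ | ⟨k, hk, hkb, -, -⟩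
  · constructor <;> omega
  · constructor <;> omega

-- ---- the visible-stack abstraction ----

def pvVisB (rs : List Int) (i j : Nat) : Bool :=
  decide (j < i) && (List.range i).all (fun k => !decide (j < k) || decide (rs.getD k 0 ≤ rs.getD j 0))

theorem pvVisB_iff (rs : List Int) (i j : Nat) :
    pvVisB rs i j = true ↔ (j < i ∧ ∀ k, k < i → j < k → rs.getD k 0 ≤ rs.getD j 0) := by
  simp only [pvVisB, Bool.and_eq_true, List.all_eq_true, List.mem_range, Bool.or_eq_true,
    Bool.not_eq_true', decide_eq_true_iff, decide_eq_false_iff_not]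
  constructor
  · rintro ⟨h1, h2⟩
    exact ⟨h1, fun k hk hjk => ((h2 k hk).resolve_left (by omega))⟩
  · rintro ⟨h1, h2⟩
    refine ⟨h1, fun k hk => ?_⟩
    by_cases h : j < k
    · exact Or.inr (h2 k hk h)
    · exact Or.inl h

def pvStk (rs : List Int) (i : Nat) : List Nat :=
  ((List.range i).filter (pvVisB rs i)).reverse

def pvLbF (rs : List Int) (j : Nat) : Int := pvScanL rs (rs.getD j 0) j

def pvEntry (rs : List Int) (j : Nat) : Option Int × Int × Int :=
  (some (rs.getD j 0), (j : Int), pvLbF rs j)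

def pvStkE (rs : List Int) (i : Nat) : List (Option Int × Int × Int) :=
  (pvStk rs i).map (pvEntry rs) ++ [(none, -1, -1)]

def pvGroup (rs : List Int) (i : Nat) : List (Int × Int × Int) :=
  ((pvStk rs i).filter (fun j => decide (rs.getD j 0 < rs.getD i 0))).map
    (fun (j : Nat) => ((j : Int), pvLbF rs j, (i : Int)))

theorem pvStk_mem (rs : List Int) (i j : Nat) :
    j ∈ pvStk rs i ↔ (j < i ∧ ∀ k, k < i → j < k → rs.getD k 0 ≤ rs.getD j 0) := by
  simp only [pvStk, List.mem_reverse, List.mem_filter, List.mem_range, pvVisB_iff]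
  tauto

theorem pvStk_pairwise_gt (rs : List Int) (i : Nat) : (pvStk rs i).Pairwise (fun a b => b < a) := by
  unfold pvStk
  rw [List.pairwise_reverse]
  exact List.Pairwise.filter _ (List.pairwise_lt_range)

theorem pvStk_pairwise_rank (rs : List Int) (i : Nat) :
    (pvStk rs i).Pairwise (fun a b => rs.getD a 0 ≤ rs.getD b 0) := by
  refine List.Pairwise.imp_of_mem ?_ (pvStk_pairwise_gt rs i)
  intro a b ha hb hba
  obtain ⟨hai, _⟩ := (pvStk_mem rs i a).mp ha
  obtain ⟨hbi, hb2⟩ := (pvStk_mem rs i b).mp hb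
  exact hb2 a hai hba

theorem pvStk_succ (rs : List Int) (i : Nat) :
    pvStk rs (i + 1) = i :: (pvStk rs i).filter (fun j => !decide (rs.getD j 0 < rs.getD i 0)) := by
  have hvi : pvVisB rs (i + 1) i = true := by
    rw [pvVisB_iff]
    exact ⟨by omega, fun k hk hik => by omega⟩
  unfold pvStk
  rw [List.range_succ, List.filter_append, List.filter_reverse, List.filter_filter]
  simp only [List.filter_cons, hvi, if_true, List.filter_nil, List.reverse_append,
    List.reverse_cons, List.reverse_nil, List.nil_append, List.cons_append]
  congr 1
  refine congrArg List.reverse (List.filter_congr ?_)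
  intro j hj
  rw [List.mem_range] at hj
  rw [Bool.eq_iff_iff]
  simp only [Bool.and_eq_true, pvVisB_iff, Bool.not_eq_true', decide_eq_false_iff_not, not_lt]
  constructor
  · rintro ⟨-, h2⟩
    refine ⟨h2 i (by omega) hj, ⟨hj, fun k hk hjk => h2 k (by omega) hjk⟩⟩
  · rintro ⟨h3, ⟨-, h2⟩⟩
    refine ⟨by omega, fun k hk hjk => ?_⟩
    rcases Nat.lt_succ_iff_lt_or_eq.mp hk with h' | h'
    · exact h2 k h' hjk
    · exact h' ▸ h3

-- if some m < i has rank above rs[i], some stack element above m does too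
theorem pvStk_witness (rs : List Int) (i m : Nat) (hm : m < i) (hgt : rs.getD i 0 < rs.getD m 0) :
    ∃ m', m ≤ m' ∧ m' ∈ pvStk rs i ∧ rs.getD i 0 < rs.getD m' 0 := by
  obtain ⟨m', h1, h2, h3, h4⟩ := pvGreatest (fun k => rs.getD i 0 < rs.getD k 0) i m hm hgt
  refine ⟨m', h1, (pvStk_mem rs i m').mpr ⟨h2, fun k hk hmk => ?_⟩, h3⟩
  have := h4 k hmk hk
  omega

-- ---- the three push cases: the stored left bound is B's left scan ----

theorem pvLb_case_empty (rs : List Int) (i : Nat)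
    (h : ∀ j, j ∈ pvStk rs i → rs.getD j 0 < rs.getD i 0) : pvLbF rs i = 0 := by
  refine pvScanL_eq_of_isLb rs _ i 0 (Or.inl ⟨rfl, fun m hm => ?_⟩)
  by_contra hc
  obtain ⟨m', _, hmem, hgt⟩ := pvStk_witness rs i m hm (by omega)
  exact absurd (h m' hmem) (by omega)

theorem pvLb_case_eq (rs : List Int) (i t : Nat) (ht : t ∈ pvStk rs i)
    (he : rs.getD t 0 = rs.getD i 0) : pvLbF rs i = pvLbF rs t := by
  obtain ⟨hti, hvt⟩ := (pvStk_mem rs i t).mp ht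
  refine pvScanL_eq_of_isLb rs _ i _ ?_
  rcases pvScanL_isLb rs (rs.getD t 0) t with ⟨h0, hall⟩ | ⟨m, hw, hm, hgt, hall⟩
  · refine Or.inl ⟨h0, fun m hmi => ?_⟩
    rw [← he]
    rcases Nat.lt_trichotomy m t with h | h | h
    · exact hall m h
    · exact h ▸ le_refl _
    · exact hvt m hmi h
  · refine Or.inr ⟨m, hw, by omega, by rw [← he]; exact hgt, fun k h1 h2 => ?_⟩
    rw [← he]
    rcases Nat.lt_trichotomy k t with h | h | h
    · exact hall k h1 h
    · exact h ▸ le_refl _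
    · exact hvt k h2 h

theorem pvLb_case_lt (rs : List Int) (i t : Nat) (ht : t ∈ pvStk rs i)
    (hlt : rs.getD i 0 < rs.getD t 0)
    (hmax : ∀ m, t < m → m < i → rs.getD m 0 ≤ rs.getD i 0) : pvLbF rs i = (t : Int) + 1 := by
  refine pvScanL_eq_of_isLb rs _ i _ (Or.inr ⟨t, rfl, ((pvStk_mem rs i t).mp ht).1, hlt, hmax⟩)

-- head of the kept part bounds every later greater-rank position
theorem pvKept_max (rs : List Int) (i t : Nat) (rest : List Nat)
    (hk : (pvStk rs i).filter (fun j => !decide (rs.getD j 0 < rs.getD i 0)) = t :: rest) :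
    ∀ m, t < m → m < i → rs.getD m 0 ≤ rs.getD i 0 := by
  intro m h1 h2
  by_contra hc
  rw [not_le] at hc
  obtain ⟨m', hmm', hmem, hgt⟩ := pvStk_witness rs i m h2 (by omega)
  have hker : m' ∈ t :: rest := by
    rw [← hk]
    refine List.mem_filter.mpr ⟨hmem, ?_⟩
    simp only [Bool.not_eq_true', decide_eq_false_iff_not, not_lt]
    omega
  have hpw : (t :: rest).Pairwise (fun a b => b < a) :=
    hk ▸ List.Pairwise.filter _ (pvStk_pairwise_gt rs i)
  rcases List.mem_cons.mp hker with h | h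
  · omega
  · have := (List.pairwise_cons.mp hpw).1 m' h
    omega

-- ---- A: pop, step, loop, flush ----

theorem pvPopA_eq (rs : List Int) (rc i : Int) : ∀ (js : List Nat),
    pvPopA rc i (js.map (pvEntry rs) ++ [(none, -1, -1)]) =
      ((js.takeWhile (fun j => decide (rs.getD j 0 < rc))).map (fun (j : Nat) => ((j : Int), pvLbF rs j, i)),
       (js.dropWhile (fun j => decide (rs.getD j 0 < rc))).map (pvEntry rs) ++ [(none, -1, -1)]) := by
  intro js
  induction js with
  | nil => simp [pvPopA]
  | cons j t ih =>
    simp only [List.map_cons, List.cons_append, List.takeWhile_cons, List.dropWhile_cons, pvEntry, pvPopA]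
    by_cases h : rs[j]?.getD 0 < rc
    · simp [h, ih]
    · simp [h, pvEntry]

theorem pvStepA_spec (rs : List Int) (E : List (Int × Int × Int)) (i : Nat) :
    pvStepA (rs.getD i 0) (i : Int) (E, pvStkE rs i) = (E ++ pvGroup rs i, pvStkE rs (i + 1)) := by
  have hpw : (pvStk rs i).Pairwise (fun a b =>
      decide (rs.getD b 0 < rs.getD i 0) = true → decide (rs.getD a 0 < rs.getD i 0) = true) := by
    refine List.Pairwise.imp_of_mem ?_ (pvStk_pairwise_rank rs i)
    intro a b _ _ hab hpb
    simp only [decide_eq_true_iff] at *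
    omega
  obtain ⟨htw, hdw⟩ := pvTakeDrop (fun j => decide (rs.getD j 0 < rs.getD i 0)) (pvStk rs i) hpw
  unfold pvStepA pvStkE
  rw [pvPopA_eq, htw, hdw]
  rcases hkept : (pvStk rs i).filter (fun j => !decide (rs.getD j 0 < rs.getD i 0)) with _ | ⟨t, rest⟩
  · have hLb : pvLbF rs i = 0 := by
      refine pvLb_case_empty rs i (fun j hj => ?_)
      have := List.filter_eq_nil_iff.mp hkept j hj
      simp only [Bool.not_eq_true', decide_eq_false_iff_not, Decidable.not_not] at this
      exact this
    simp only [hkept, List.map_nil, List.nil_append, pvGroup, pvStk_succ,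
      List.map_cons, pvEntry, hLb]
    norm_num
  · have htmem : t ∈ pvStk rs i ∧ (!decide (rs.getD t 0 < rs.getD i 0)) = true := by
      have : t ∈ (pvStk rs i).filter (fun j => !decide (rs.getD j 0 < rs.getD i 0)) := by
        rw [hkept]; exact List.mem_cons_self
      exact List.mem_filter.mp this
    have htge : rs.getD i 0 ≤ rs.getD t 0 := by
      have := htmem.2
      simp only [Bool.not_eq_true', decide_eq_false_iff_not, not_lt] at this
      exact this
    simp only [List.map_cons, List.cons_append, pvEntry]
    by_cases he : rs.getD t 0 = rs.getD i 0
    · have hbeq : (rs.getD t 0 == rs.getD i 0) = true := beq_iff_eq.mpr he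
      have hLb : pvLbF rs i = pvLbF rs t := pvLb_case_eq rs i t htmem.1 he
      simp only [hbeq, if_true, pvGroup, pvStk_succ, hkept, List.map_cons, pvEntry, hLb,
        List.cons_append]
    · have hbeq : (rs.getD t 0 == rs.getD i 0) = false := beq_eq_false_iff_ne.mpr he
      have hlt : rs.getD i 0 < rs.getD t 0 := by omega
      have hLb : pvLbF rs i = (t : Int) + 1 :=
        pvLb_case_lt rs i t htmem.1 hlt (pvKept_max rs i t rest hkept)
      simp only [hbeq, Bool.false_eq_true, if_false, pvGroup, pvStk_succ, hkept, List.map_cons,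
        pvEntry, hLb, List.cons_append]

theorem pvFlushA_eq (rs : List Int) (n : Int) : ∀ (js : List Nat),
    pvFlushA n (js.map (pvEntry rs) ++ [(none, -1, -1)]) =
      js.map (fun (j : Nat) => ((j : Int), pvLbF rs j, n)) := by
  intro js
  induction js with
  | nil => rfl
  | cons j t ih =>
    obtain ⟨y, ys, hy⟩ : ∃ y ys, t.map (pvEntry rs) ++ [((none : Option Int), (-1 : Int), (-1 : Int))] = y :: ys := by
      cases t <;> exact ⟨_, _, rfl⟩
    simp only [List.map_cons, List.cons_append, hy, pvFlushA, pvEntry]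
    rw [← hy, ih]

theorem pvLoopA_spec (ranks : List (String × Int)) (cs : List Char)
    (rs : List Int) (hrs : rs = cs.map (fun c => (pvRankGet ranks c).getD 0)) :
    ∀ (k : Nat) (E : List (Int × Int × Int)), k ≤ cs.length →
      pvLoopA ranks (cs.drop k) (k : Int) (E, pvStkE rs k) =
        (E ++ (List.range' k (cs.length - k)).flatMap (pvGroup rs), pvStkE rs cs.length) := by
  intro k E hk
  induction hd : cs.length - k generalizing k E with
  | zero =>
    have hkn : k = cs.length := by omega
    subst hkn
    rw [List.drop_length]
    simp [pvLoopA]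
  | succ d ih =>
    have hkl : k < cs.length := by omega
    rw [List.drop_eq_getElem_cons hkl, pvLoopA]
    have hrank : (pvRankGet ranks cs[k]).getD 0 = rs.getD k 0 := by
      subst hrs
      rw [List.getD_eq_getElem?_getD, List.getElem?_map, List.getElem?_eq_getElem hkl]
      rfl
    rw [hrank, pvStepA_spec]
    have hcast : (k : Int) + 1 = ((k + 1 : Nat) : Int) := by push_cast; ring
    rw [hcast, ih (k + 1) (E ++ pvGroup rs k) (by omega) (by omega)]
    rw [List.range'_succ, List.flatMap_cons, List.append_assoc]

theorem pvPortA_eq (string : String) (ranks : List (String × Int)) :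
    compute_rank_intervals string ranks =
      (List.range' 0 string.toList.length).flatMap
          (pvGroup (string.toList.map (fun c => (pvRankGet ranks c).getD 0))) ++
        (pvStk (string.toList.map (fun c => (pvRankGet ranks c).getD 0)) string.toList.length).map
          (fun (j : Nat) => ((j : Int), pvLbF (string.toList.map (fun c => (pvRankGet ranks c).getD 0)) j,
            (string.toList.length : Int))) := by
  have h := pvLoopA_spec ranks string.toList
    (string.toList.map (fun c => (pvRankGet ranks c).getD 0)) rfl 0 [] (Nat.zero_le _)
  simp only [List.drop_zero, Nat.cast_zero, Nat.sub_zero, List.nil_append] at h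
  show (pvLoopA ranks string.toList 0 ([], [(none, -1, -1)])).1 ++
      pvFlushA (string.toList.length : Int) (pvLoopA ranks string.toList 0 ([], [(none, -1, -1)])).2 = _
  rw [show ([((none : Option Int), (-1 : Int), (-1 : Int))] : List (Option Int × Int × Int)) =
      pvStkE (string.toList.map (fun c => (pvRankGet ranks c).getD 0)) 0 from rfl, h]
  rw [pvStkE, pvFlushA_eq]

-- ---- B: the peer chain walks the stack ----

-- popping the stack of k+1 = k, then the stack above the peer link of k
theorem pvStk_chain (rs : List Int) (k : Nat) :
    pvStk rs (k + 1) = k :: pvStk rs ((pvNearest rs (rs.getD k 0) false k + 1).toNat) := by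
  rw [pvStk_succ]
  congr 1
  rcases pvNearest_isGe rs (rs.getD k 0) k with ⟨h0, hall⟩ | ⟨g, hg, hgk, hge, hall⟩
  · rw [h0]
    have : ((-1 : Int) + 1).toNat = 0 := by decide
    rw [this]
    have hnil : pvStk rs 0 = [] := rfl
    rw [hnil]
    refine List.filter_eq_nil_iff.mpr (fun j hj => ?_)
    obtain ⟨hjk, -⟩ := (pvStk_mem rs k j).mp hj
    simp only [Bool.not_eq_true', decide_eq_false_iff_not, Decidable.not_not]
    exact hall j hjk
  · rw [hg]
    have hcast : ((g : Int) + 1).toNat = g + 1 := by omega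
    rw [hcast]
    simp only [pvStk, List.filter_reverse, List.filter_filter]
    refine congrArg List.reverse ?_
    have hsplit : List.range k = List.range (g + 1) ++ (List.range (k - (g + 1))).map (g + 1 + ·) := by
      rw [← List.range_add]
      congr 1
      omega
    rw [hsplit, List.filter_append]
    have hright : ((List.range (k - (g + 1))).map (g + 1 + ·)).filter
        (fun a => !decide (rs.getD a 0 < rs.getD k 0) && pvVisB rs k a) = [] := by
      refine List.filter_eq_nil_iff.mpr (fun j hj => ?_)
      obtain ⟨m, hm, rfl⟩ := List.mem_map.mp hj
      rw [List.mem_range] at hm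
      have hjlt : rs[g + 1 + m]?.getD 0 < rs[k]?.getD 0 := hall (g + 1 + m) (by omega) (by omega)
      simp
      intro hle
      exact absurd hle (not_le.mpr hjlt)
    rw [hright, List.append_nil]
    refine List.filter_congr (fun j hj => ?_)
    rw [List.mem_range] at hj
    rw [Bool.eq_iff_iff]
    simp only [Bool.and_eq_true, pvVisB_iff, Bool.not_eq_true', decide_eq_false_iff_not, not_lt]
    constructor
    · rintro ⟨hkle, ⟨hjk, hdom⟩⟩
      exact ⟨by omega, fun m hm hjm => hdom m (by omega) hjm⟩
    · rintro ⟨-, hdom⟩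
      have hgj : rs.getD k 0 ≤ rs.getD j 0 := by
        rcases Nat.lt_or_ge j g with h | h
        · exact le_trans hge (hdom g (by omega) h)
        · have : j = g := by omega
          exact this ▸ hge
      refine ⟨hgj, ⟨by omega, fun m hm hjm => ?_⟩⟩
      rcases Nat.lt_or_ge m (g + 1) with h | h
      · exact hdom m h hjm
      · have := hall m h hm
        omega

-- the peer chain with the rank condition emits takeWhile over the stack
theorem pvClose_eq (rs hi pe : List Int)
    (hhi : hi = (List.range rs.length).map (fun j => pvNearest rs (rs.getD j 0) true j))
    (hpe : pe = (List.range rs.length).map (fun j => pvNearest rs (rs.getD j 0) false j))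
    (ri iI : Int) :
    ∀ (fuel i : Nat), i ≤ fuel → i ≤ rs.length →
      pvClose rs hi pe ri iI ((i : Int) - 1) fuel =
        ((pvStk rs i).takeWhile (fun j => decide (rs.getD j 0 < ri))).map
          (fun (j : Nat) => ((j : Int), pvLbF rs j, iI)) := by
  intro fuel
  induction fuel with
  | zero =>
    intro i hif _
    have hz : i = 0 := by omega
    subst hz
    rfl
  | succ fuel ih =>
    intro i hif hin
    rcases i with _ | k
    · rw [pvClose, if_neg (fun h => absurd h.1 (by decide))]
      rfl
    · have hk : ((k + 1 : Nat) : Int) - 1 = (k : Int) := by push_cast; ring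
      rw [hk, pvClose]
      have htn : ((k : Int)).toNat = k := by omega
      have hkn : k < rs.length := by omega
      have hhik : hi.getD k 0 = pvNearest rs (rs.getD k 0) true k := by
        rw [hhi, PySem.List.getD_map_range _ _ _ _ hkn]
      have hpek : pe.getD k 0 = pvNearest rs (rs.getD k 0) false k := by
        rw [hpe, PySem.List.getD_map_range _ _ _ _ hkn]
      obtain ⟨hgl, hgu⟩ := pvNearest_false_lt rs (rs.getD k 0) k
      by_cases hc : rs.getD k 0 < ri
      · have hcond : (0 : Int) ≤ (k : Int) ∧ rs.getD ((k : Int)).toNat 0 < ri := by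
          rw [htn]; exact ⟨by omega, hc⟩
        rw [if_pos hcond, htn, hhik, hpek, pvStk_chain rs k,
          List.takeWhile_cons_of_pos (by simpa using hc), List.map_cons]
        set g := pvNearest rs (rs.getD k 0) false k with hgdef
        obtain ⟨m, hm⟩ : ∃ m : Nat, g = (m : Int) - 1 := ⟨(g + 1).toNat, by omega⟩
        have hmk : m ≤ k := by omega
        congr 1
        · rw [pvNearest_true_succ]
          rfl
        · rw [hm, show (((m : Int) - 1) + 1).toNat = m from by omega]
          exact ih m (by omega) (by omega)
      · have hcond : ¬ ((0 : Int) ≤ (k : Int) ∧ rs.getD ((k : Int)).toNat 0 < ri) := by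
          rw [htn]; exact fun h => hc h.2
        rw [if_neg hcond, pvStk_chain rs k,
          List.takeWhile_cons_of_neg (by simpa using hc), List.map_nil]

-- the unconditional peer chain emits the whole stack
theorem pvSettle_eq (rs hi pe : List Int)
    (hhi : hi = (List.range rs.length).map (fun j => pvNearest rs (rs.getD j 0) true j))
    (hpe : pe = (List.range rs.length).map (fun j => pvNearest rs (rs.getD j 0) false j))
    (nI : Int) :
    ∀ (fuel i : Nat), i ≤ fuel → i ≤ rs.length →
      pvSettle hi pe nI ((i : Int) - 1) fuel =
        (pvStk rs i).map (fun (j : Nat) => ((j : Int), pvLbF rs j, nI)) := by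
  intro fuel
  induction fuel with
  | zero =>
    intro i hif _
    have hz : i = 0 := by omega
    subst hz
    rfl
  | succ fuel ih =>
    intro i hif hin
    rcases i with _ | k
    · rw [pvSettle, if_neg (by decide)]
      rfl
    · have hk : ((k + 1 : Nat) : Int) - 1 = (k : Int) := by push_cast; ring
      rw [hk, pvSettle, if_pos (by omega)]
      have htn : ((k : Int)).toNat = k := by omega
      have hkn : k < rs.length := by omega
      have hhik : hi.getD k 0 = pvNearest rs (rs.getD k 0) true k := by
        rw [hhi, PySem.List.getD_map_range _ _ _ _ hkn]
      have hpek : pe.getD k 0 = pvNearest rs (rs.getD k 0) false k := by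
        rw [hpe, PySem.List.getD_map_range _ _ _ _ hkn]
      obtain ⟨hgl, hgu⟩ := pvNearest_false_lt rs (rs.getD k 0) k
      rw [htn, hhik, hpek, pvStk_chain rs k, List.map_cons]
      set g := pvNearest rs (rs.getD k 0) false k with hgdef
      obtain ⟨m, hm⟩ : ∃ m : Nat, g = (m : Int) - 1 := ⟨(g + 1).toNat, by omega⟩
      have hmk : m ≤ k := by omega
      congr 1
      · rw [pvNearest_true_succ]
        rfl
      · rw [hm, show (((m : Int) - 1) + 1).toNat = m from by omega]
        exact ih m (by omega) (by omega)

-- with ri = rs[i] the takeWhile is a filter: the group closed at i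
theorem pvClose_group (rs hi pe : List Int)
    (hhi : hi = (List.range rs.length).map (fun j => pvNearest rs (rs.getD j 0) true j))
    (hpe : pe = (List.range rs.length).map (fun j => pvNearest rs (rs.getD j 0) false j))
    (i : Nat) (hin : i ≤ rs.length) :
    pvClose rs hi pe (rs.getD i 0) (i : Int) ((i : Int) - 1) rs.length = pvGroup rs i := by
  rw [pvClose_eq rs hi pe hhi hpe _ _ rs.length i hin hin]
  have hpw : (pvStk rs i).Pairwise (fun a b =>
      decide (rs.getD b 0 < rs.getD i 0) = true → decide (rs.getD a 0 < rs.getD i 0) = true) := by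
    refine List.Pairwise.imp_of_mem ?_ (pvStk_pairwise_rank rs i)
    intro a b _ _ hab hpb
    simp only [decide_eq_true_iff] at *
    omega
  rw [(pvTakeDrop _ _ hpw).1]
  rfl

theorem pvAltCore (rs hi pe : List Int) (n : Nat) (hn : n = rs.length)
    (hhi : hi = (List.range n).map (fun j => pvNearest rs (rs.getD j 0) true j))
    (hpe : pe = (List.range n).map (fun j => pvNearest rs (rs.getD j 0) false j)) :
    (List.range n).foldl (fun acc i => acc ++ pvClose rs hi pe (rs.getD i 0) (i : Int) ((i : Int) - 1) n) []
      ++ pvSettle hi pe (n : Int) ((n : Int) - 1) n =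
    (List.range n).flatMap (pvGroup rs) ++
      (pvStk rs n).map (fun (j : Nat) => ((j : Int), pvLbF rs j, (n : Int))) := by
  subst hn
  rw [PySem.List.foldl_append_eq_flatMap, List.nil_append]
  congr 1
  · refine List.flatMap_congr (fun i hi2 => ?_)
    rw [List.mem_range] at hi2
    exact pvClose_group rs hi pe hhi hpe i (by omega)
  · exact pvSettle_eq rs hi pe hhi hpe _ rs.length rs.length le_rfl le_rfl

theorem pvPortB_eq (string : String) (ranks : List (String × Int)) :
    compute_rank_intervals_alt string ranks =
      (List.range string.toList.length).flatMap
          (pvGroup (string.toList.map (fun c => (pvRankGet ranks c).getD 0))) ++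
        (pvStk (string.toList.map (fun c => (pvRankGet ranks c).getD 0)) string.toList.length).map
          (fun (j : Nat) => ((j : Int), pvLbF (string.toList.map (fun c => (pvRankGet ranks c).getD 0)) j,
            (string.toList.length : Int))) :=
  pvAltCore (string.toList.map (fun c => (pvRankGet ranks c).getD 0)) _ _
    string.toList.length (by simp) rfl rfl

-- ===== VERDICT (by name: the statement is the Claim_ definition above) =====
theorem compute_rank_intervals_spec : Claim_equal_compute_rank_intervals := by
  intro string ranks _ _
  unfold Spec_compute_rank_intervals
  rw [pvPortA_eq, pvPortB_eq, List.range_eq_range']
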